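-- pv_equiv track=rewrite | github.com/A-D-DBS-application/web-application-2025-group32 | app/analytics.py | _calculate_urgency_distribution
-- ===== SOURCE A (Python) =====
-- from typing import List, Dict, Tuple, Optional
--
-- def _calculate_urgency_distribution(sorted_feedback: List[Dict]) -> Dict[str, int]:
--     """
--     Bereken distributie van urgentie levels.
--
--     Args:
--         sorted_feedback: Lijst van geanalyseerde feedback items
--
--     Returns:
--         Dictionary met counts per urgentie level
--     """
--     distribution = {
--         'onvoldoende': 0,  # urgency > 50 (scores < 50/100)
--         'voldoende': 0,    # urgency 25-50 (scores 50-75/100)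
--         'uitstekend': 0    # urgency < 25 (scores ≥ 76/100)
--     }
--
--     for item in sorted_feedback:
--         urgency = item.get('urgency_score', 0)
--         if urgency > 50:  # Hoge urgency = slechte feedback (< 50/100)
--             distribution['onvoldoende'] += 1
--         elif urgency >= 25:  # Matige urgency = matige feedback (50-75/100)
--             distribution['voldoende'] += 1
--         else:  # Lage urgency = goede feedback (≥ 76/100)
--             distribution['uitstekend'] += 1
--
--     return distribution
-- ===== SOURCE B (Python) =====
-- from typing import List, Dict
--
--
-- def _calculate_urgency_distribution(sorted_feedback: List[Dict]) -> Dict[str, int]: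
--     """Build the distribution from three independent filtered counting passes."""
--     return {
--         'onvoldoende': sum(1 for it in sorted_feedback
--                            if it.get('urgency_score', 0) > 50),
--         'voldoende': sum(1 for it in sorted_feedback
--                          if 25 <= it.get('urgency_score', 0) <= 50),
--         'uitstekend': sum(1 for it in sorted_feedback
--                           if it.get('urgency_score', 0) < 25),
--     }
-- ===== Notes on version B (the rewrite author's own statement) =====
-- stated objective: alternative
-- what changed: Replaced the single stateful loop with a mutually-exclusive if/elif/else chain mutating a dict by a direct dict literal built from three independent filtered counting passes over the list.
import Mathlib
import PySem

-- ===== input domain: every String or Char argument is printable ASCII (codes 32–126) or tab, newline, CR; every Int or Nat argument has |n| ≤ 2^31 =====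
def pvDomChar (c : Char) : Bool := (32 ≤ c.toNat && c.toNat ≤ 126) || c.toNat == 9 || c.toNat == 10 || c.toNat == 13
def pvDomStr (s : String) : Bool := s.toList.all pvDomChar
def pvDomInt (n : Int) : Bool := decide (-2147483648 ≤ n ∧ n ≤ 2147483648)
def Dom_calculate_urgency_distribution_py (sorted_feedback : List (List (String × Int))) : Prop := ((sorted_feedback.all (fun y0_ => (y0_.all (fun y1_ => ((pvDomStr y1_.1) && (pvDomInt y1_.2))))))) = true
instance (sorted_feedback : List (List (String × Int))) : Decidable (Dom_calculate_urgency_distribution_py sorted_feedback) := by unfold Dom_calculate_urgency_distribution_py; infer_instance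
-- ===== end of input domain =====

-- B replaces A's single branching loop over a mutable dict with three independent
-- filtered counting passes assembled into a dict literal (objective: alternative).

-- ===== PORT A =====
-- A: initialise a dict with the three counters at 0, then one loop whose
-- if/elif/else chain increments exactly one counter per item; return the dict.
def calculate_urgency_distribution_py (sorted_feedback : List (List (String × Int))) : List (String × Int) :=
  let distribution : PySem.Dict String Int :=
    PySem.Dict.ofList [("onvoldoende", 0), ("voldoende", 0), ("uitstekend", 0)]
  let final := sorted_feedback.foldl (fun d item =>
    let urgency := (PySem.Dict.mk item).getD "urgency_score" 0
    if urgency > 50 then d.modify "onvoldoende" 0 (· + 1)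
    else if urgency ≥ 25 then d.modify "voldoende" 0 (· + 1)
    else d.modify "uitstekend" 0 (· + 1)) distribution
  final.items

-- ===== PORT B =====
-- B: three filtered counting passes (sum(1 for … if …) = countP), one per key.
def calculate_urgency_distribution_py_alt (sorted_feedback : List (List (String × Int))) : List (String × Int) :=
  [("onvoldoende", (sorted_feedback.countP
      (fun it => decide ((PySem.Dict.mk it).getD "urgency_score" 0 > 50)) : Int)),
   ("voldoende", (sorted_feedback.countP
      (fun it => decide (25 ≤ (PySem.Dict.mk it).getD "urgency_score" 0 ∧ (PySem.Dict.mk it).getD "urgency_score" 0 ≤ 50)) : Int)),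
   ("uitstekend", (sorted_feedback.countP
      (fun it => decide ((PySem.Dict.mk it).getD "urgency_score" 0 < 25)) : Int))]

-- ===== PRECONDITION & SPEC =====
def Spec_calculate_urgency_distribution_py (sorted_feedback : List (List (String × Int))) (out : List (String × Int)) : Prop := out = calculate_urgency_distribution_py_alt sorted_feedback
instance (sorted_feedback : List (List (String × Int))) (out : List (String × Int)) : Decidable (Spec_calculate_urgency_distribution_py sorted_feedback out) := by unfold Spec_calculate_urgency_distribution_py; infer_instance

-- ===== CLAIM (what is proved, stated in full; the proofs are below) =====
def Claim_equal_calculate_urgency_distribution_py : Prop := ∀ (sorted_feedback : List (List (String × Int))), Dom_calculate_urgency_distribution_py sorted_feedback → Spec_calculate_urgency_distribution_py sorted_feedback (calculate_urgency_distribution_py sorted_feedback)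

-- ===== LEMMAS AND PROOFS =====

-- The urgency score A reads from an item, named for the proofs.
def pvU (it : List (String × Int)) : Int := (PySem.Dict.mk it).getD "urgency_score" 0

-- Loop invariant: starting from the three-counter dict with values a, b, c,
-- A's loop adds the three filtered counts.
theorem pv_fold_inv (sf : List (List (String × Int))) (a b c : Int) :
    (sf.foldl (fun d item =>
        let urgency := pvU item
        if urgency > 50 then d.modify "onvoldoende" 0 (· + 1)
        else if urgency ≥ 25 then d.modify "voldoende" 0 (· + 1)
        else d.modify "uitstekend" 0 (· + 1))
      (PySem.Dict.mk [("onvoldoende", a), ("voldoende", b), ("uitstekend", c)])).items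
    = [("onvoldoende", a + (sf.countP (fun it => decide (pvU it > 50)) : Int)),
       ("voldoende", b + (sf.countP (fun it => decide (25 ≤ pvU it ∧ pvU it ≤ 50)) : Int)),
       ("uitstekend", c + (sf.countP (fun it => decide (pvU it < 25)) : Int))] := by
  induction sf generalizing a b c with
  | nil => simp [List.countP]
  | cons hd tl ih =>
    simp only [List.foldl_cons, List.countP_cons]
    by_cases h1 : pvU hd > 50
    · have hstep : (PySem.Dict.mk [("onvoldoende", a), ("voldoende", b), ("uitstekend", c)]).modify "onvoldoende" 0 (· + 1)
          = PySem.Dict.mk [("onvoldoende", a + 1), ("voldoende", b), ("uitstekend", c)] := by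
        rfl
      simp only [h1, if_pos, hstep, ih]
      have hnb : ¬ (25 ≤ pvU hd ∧ pvU hd ≤ 50) := by omega
      have hnc : ¬ (pvU hd < 25) := by omega
      simp [hnb, hnc]
      omega
    · by_cases h2 : pvU hd ≥ 25
      · have hstep : (PySem.Dict.mk [("onvoldoende", a), ("voldoende", b), ("uitstekend", c)]).modify "voldoende" 0 (· + 1)
            = PySem.Dict.mk [("onvoldoende", a), ("voldoende", b + 1), ("uitstekend", c)] := by
          rfl
        simp only [if_neg h1, if_pos h2, hstep, ih]
        have hb : 25 ≤ pvU hd ∧ pvU hd ≤ 50 := by omega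
        have hnc : ¬ (pvU hd < 25) := by omega
        simp [h1, hb, hnc]
        omega
      · have hstep : (PySem.Dict.mk [("onvoldoende", a), ("voldoende", b), ("uitstekend", c)]).modify "uitstekend" 0 (· + 1)
            = PySem.Dict.mk [("onvoldoende", a), ("voldoende", b), ("uitstekend", c + 1)] := by
          rfl
        simp only [if_neg h1, if_neg h2, hstep, ih]
        have hc : pvU hd < 25 := by omega
        have hnb : ¬ (25 ≤ pvU hd ∧ pvU hd ≤ 50) := by omega
        simp [h1, hnb, hc]
        omega

-- ===== VERDICT (by name: the statement is the Claim_ definition above) =====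
theorem calculate_urgency_distribution_py_spec : Claim_equal_calculate_urgency_distribution_py := by
  intro sf _
  unfold Spec_calculate_urgency_distribution_py
  simpa [calculate_urgency_distribution_py, calculate_urgency_distribution_py_alt, pvU] using pv_fold_inv sf 0 0 0
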